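-- pv_equiv track=rewrite | github.com/rchopinw/coding_exercise | quora.py | micro_services
-- ===== SOURCE A (Python) =====
-- def micro_services(subscribe, event, end):
--     event_fact = {}
--     for query in event:
--         event_fact[query[-1]] = {'start': query[0], 'freq': query[1]}
--     subscribe_record = {x: [] for x in event_fact}
--     signal_count = {x: 0 for x in event_fact}
--     subscribe = sorted([s for s in subscribe if s[1] <= end], key=lambda x: x[1])
--     for query in subscribe:
--         start = event_fact[query[2]]['start']
--         freq = event_fact[query[2]]['freq']
--         if query[0] == 'subscrib':
--             subscribe_record[query[2]].append(query[1])
--         else: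
--             subscribe_time = max(subscribe_record[query[2]].pop(), start)
--             signal_count[query[2]] += (query[1] - start) // freq - (subscribe_time - start) // freq
--             signal_count[query[2]] += 1 if (subscribe_time - start) % freq == 0 and (
--                     query[1] - start) % freq == 0 else 0
--     for key in subscribe_record:
--         if subscribe_record[key]:
--             start = event_fact[key]['start']
--             freq = event_fact[key]['freq']
--             subscribe_time = max(subscribe_record[key].pop(), start)
--             signal_count[key] += (end - start) // freq - (subscribe_time - start) // freq
--             signal_count[key] += 1 if (subscribe_time - start) % freq == 0 and (end - start) % freq == 0 else 0
--     return signal_count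
-- ===== SOURCE B (Python) =====
-- def micro_services(subscribe, event, end):
--     event_fact = {}
--     for start, freq, name in event:
--         event_fact[name] = (start, freq)
--
--     def contrib(start, freq, sub_raw, t):
--         s = max(sub_raw, start)
--         c = (t - start) // freq - (s - start) // freq
--         if (s - start) % freq == 0 and (t - start) % freq == 0:
--             c += 1
--         return c
--
--     ordered = sorted([s for s in subscribe if s[1] <= end], key=lambda x: x[1])
--     groups = {}
--     for typ, time, name in ordered:
--         groups.setdefault(name, []).append((typ, time))
--
--     result = {}
--     for name, (start, freq) in event_fact.items():
--         seq = groups.get(name, [])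
--         total = 0
--         # repeatedly cancel the first adjacent subscribe/unsubscribe pair
--         while True:
--             i = next((j for j in range(len(seq) - 1)
--                       if seq[j][0] == 'subscrib' and seq[j + 1][0] != 'subscrib'), None)
--             if i is None:
--                 break
--             total += contrib(start, freq, seq[i][1], seq[i + 1][1])
--             seq = seq[:i] + seq[i + 2:]
--         if seq and seq[-1][0] == 'subscrib':
--             total += contrib(start, freq, seq[-1][1], end)
--         result[name] = total
--     return result
-- ===== Notes on version B (the rewrite author's own statement) =====
-- stated objective: alternative
-- what changed: A simulates one time-ordered sweep over all services, pushing subscribe times on per-service stacks and popping on unsubscribe, with a separate cleanup loop over leftover stacks; B never maintains a stack: per service it repeatedly finds and cancels the first adjacent subscribe/unsubscribe pair in the event sequence (bracket-reduction) accumulating each cancelled pair's signal count, then handles a trailing unmatched subscribe, relying on confluence of LIFO pair matching.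
import Mathlib
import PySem

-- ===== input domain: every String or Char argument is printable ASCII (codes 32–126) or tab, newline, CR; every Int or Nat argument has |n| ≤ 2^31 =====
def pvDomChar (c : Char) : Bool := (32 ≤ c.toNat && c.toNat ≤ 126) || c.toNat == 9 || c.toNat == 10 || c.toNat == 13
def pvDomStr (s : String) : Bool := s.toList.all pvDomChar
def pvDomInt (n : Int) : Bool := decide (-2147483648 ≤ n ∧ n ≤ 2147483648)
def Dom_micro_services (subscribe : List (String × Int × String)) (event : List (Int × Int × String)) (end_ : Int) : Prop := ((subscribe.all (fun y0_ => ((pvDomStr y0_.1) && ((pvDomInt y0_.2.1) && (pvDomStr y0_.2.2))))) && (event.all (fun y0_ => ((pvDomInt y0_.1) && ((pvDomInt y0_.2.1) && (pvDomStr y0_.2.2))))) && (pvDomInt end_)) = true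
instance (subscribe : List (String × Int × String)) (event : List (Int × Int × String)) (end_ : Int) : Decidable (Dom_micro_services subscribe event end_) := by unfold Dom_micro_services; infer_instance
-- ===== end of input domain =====

-- ===== PORT A =====
-- B replaces A's interleaved stack sweep by repeated adjacent subscribe/unsubscribe pair
-- cancellation per service (an 'alternative' decomposition); return values proved equal on Pre_.

-- event_fact = {} ; for query in event: event_fact[query[-1]] = {'start': query[0], 'freq': query[1]}
def msEventFact (event : List (Int × Int × String)) : PySem.Dict String (Int × Int) :=
  event.foldl (fun d q => d.insert q.2.2 (q.1, q.2.1)) PySem.Dict.empty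

-- the body of A's main 'for query in subscribe' loop (state = (subscribe_record, signal_count))
def msStepA (ef : PySem.Dict String (Int × Int))
    (st : PySem.Dict String (List Int) × PySem.Dict String Int)
    (q : String × Int × String) :
    PySem.Dict String (List Int) × PySem.Dict String Int :=
  match ef.get? q.2.2 with
  | none => st  -- Python raises KeyError here; such inputs are outside Pre_
  | some sf =>
    if q.1 == "subscrib" then
      (st.1.modify q.2.2 [] (fun l => l ++ [q.2.1]), st.2)
    else
      match PySem.List.pop? (st.1.getD q.2.2 []) with
      | none => st  -- Python raises IndexError (pop from empty list); outside Pre_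
      | some pr =>
        let subscribeTime := max pr.1 sf.1
        let c := PySem.Int.floordiv (q.2.1 - sf.1) sf.2 - PySem.Int.floordiv (subscribeTime - sf.1) sf.2
          + (if PySem.Int.mod (subscribeTime - sf.1) sf.2 = 0 ∧ PySem.Int.mod (q.2.1 - sf.1) sf.2 = 0 then 1 else 0)
        (st.1.insert q.2.2 pr.2, st.2.modify q.2.2 0 (· + c))

-- the body of A's trailing 'for key in subscribe_record' cleanup loop
def msCleanA (ef : PySem.Dict String (Int × Int)) (end_ : Int)
    (st : PySem.Dict String (List Int) × PySem.Dict String Int) (key : String) :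
    PySem.Dict String (List Int) × PySem.Dict String Int :=
  if st.1.getD key [] ≠ [] then
    match ef.get? key, PySem.List.pop? (st.1.getD key []) with
    | some sf, some pr =>
      let subscribeTime := max pr.1 sf.1
      let c := PySem.Int.floordiv (end_ - sf.1) sf.2 - PySem.Int.floordiv (subscribeTime - sf.1) sf.2
        + (if PySem.Int.mod (subscribeTime - sf.1) sf.2 = 0 ∧ PySem.Int.mod (end_ - sf.1) sf.2 = 0 then 1 else 0)
      (st.1.insert key pr.2, st.2.modify key 0 (· + c))
    | _, _ => st  -- unreachable: key ranges over event_fact's keys and the record list is nonempty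
  else st

def micro_services (subscribe : List (String × Int × String)) (event : List (Int × Int × String)) (end_ : Int) : List (String × Int) :=
  let ef := msEventFact event
  let record0 : PySem.Dict String (List Int) := ef.keys.foldl (fun d k => d.insert k []) PySem.Dict.empty
  let count0 : PySem.Dict String Int := ef.keys.foldl (fun d k => d.insert k 0) PySem.Dict.empty
  let ordered := PySem.List.sorted (subscribe.filter (fun s => decide (s.2.1 ≤ end_))) (fun x => x.2.1) false
  let st := ordered.foldl (msStepA ef) (record0, count0)
  let st2 := st.1.keys.foldl (msCleanA ef end_) st
  st2.2.items

-- ===== PORT B =====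
-- contrib(start, freq, sub_raw, t)
def msContrib (start freq subRaw t : Int) : Int :=
  let s := max subRaw start
  let c := PySem.Int.floordiv (t - start) freq - PySem.Int.floordiv (s - start) freq
  if PySem.Int.mod (s - start) freq = 0 ∧ PySem.Int.mod (t - start) freq = 0 then c + 1 else c

-- B's inner 'next(...)' scan: the first adjacent (subscribe, non-subscribe) pair; returns
-- (subscribe time, unsubscribe time, the sequence with the pair deleted)
def msFindPair : List (String × Int) → Option (Int × Int × List (String × Int))
  | [] => none
  | [_] => none
  | a :: b :: rest =>
    if a.1 == "subscrib" && !(b.1 == "subscrib") then some (a.2, b.2, rest)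
    else
      match msFindPair (b :: rest) with
      | none => none
      | some (s, t, r) => some (s, t, a :: r)

lemma msFindPair_length : ∀ (seq : List (String × Int)) (s t : Int) (r : List (String × Int)),
    msFindPair seq = some (s, t, r) → r.length + 2 = seq.length := by
  intro seq
  induction seq with
  | nil => intro s t r h; simp [msFindPair] at h
  | cons a tl ih =>
    intro s t r h
    cases tl with
    | nil => simp [msFindPair] at h
    | cons b rest =>
      by_cases hc : (a.1 == "subscrib" && !(b.1 == "subscrib")) = true
      · simp [msFindPair, hc] at h
        obtain ⟨-, -, hr⟩ := h
        simp [← hr]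
      · simp only [msFindPair, hc, Bool.false_eq_true, if_neg, not_false_iff] at h
        cases hm : msFindPair (b :: rest) with
        | none => rw [hm] at h; simp at h
        | some p =>
          obtain ⟨s', t', r'⟩ := p
          rw [hm] at h
          simp at h
          obtain ⟨-, -, hr⟩ := h
          have := ih s' t' r' hm
          simp [← hr, ← this]

-- B's 'while True' cancellation loop: returns (total from cancelled pairs, irreducible leftover)
def msReduce (start freq : Int) (seq : List (String × Int)) : Int × List (String × Int) :=
  match h : msFindPair seq with
  | none => (0, seq)
  | some (s, t, r) =>
    let p := msReduce start freq r
    (msContrib start freq s t + p.1, p.2)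
termination_by seq.length
decreasing_by
  have := msFindPair_length seq s t r h
  omega

-- B's trailing 'if seq and seq[-1][0] == "subscrib"'
def msTail (start freq end_ : Int) (seq : List (String × Int)) : Int :=
  match seq.getLast? with
  | none => 0
  | some q => if q.1 == "subscrib" then msContrib start freq q.2 end_ else 0

def micro_services_alt (subscribe : List (String × Int × String)) (event : List (Int × Int × String)) (end_ : Int) : List (String × Int) :=
  let ef := event.foldl (fun d q => d.insert q.2.2 (q.1, q.2.1)) (PySem.Dict.empty : PySem.Dict String (Int × Int))
  let ordered := PySem.List.sorted (subscribe.filter (fun s => decide (s.2.1 ≤ end_))) (fun x => x.2.1) false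
  let groups : PySem.Dict String (List (String × Int)) :=
    ordered.foldl (fun g q => g.modify q.2.2 [] (fun l => l ++ [(q.1, q.2.1)])) PySem.Dict.empty
  let res : PySem.Dict String Int := ef.items.foldl (fun r p =>
    let red := msReduce p.2.1 p.2.2 (groups.getD p.1 [])
    r.insert p.1 (red.1 + msTail p.2.1 p.2.2 end_ red.2)) PySem.Dict.empty
  res.items

-- ===== PRECONDITION & SPEC =====
-- Pre_ excludes exactly the inputs where the Python A raises: a filtered subscribe query naming a
-- service absent from event (KeyError), an unsubscribe with no pending subscribe for its service in
-- time order (IndexError on pop), or a service with freq 0 that has any filtered query (ZeroDivisionError).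
def msTs (subscribe : List (String × Int × String)) (end_ : Int) (s : String) : List String :=
  ((PySem.List.sorted (subscribe.filter (fun x => decide (x.2.1 ≤ end_))) (fun x => x.2.1) false).filter (fun x => x.2.2 == s)).map (fun x => x.1)

def Pre_micro_services (subscribe : List (String × Int × String)) (event : List (Int × Int × String)) (end_ : Int) : Prop :=
  (∀ q ∈ subscribe.filter (fun s => decide (s.2.1 ≤ end_)), ∃ e ∈ event, e.2.2 = q.2.2) ∧
  ∀ e ∈ event,
    ((event.reverse.find? (fun x => x.2.2 == e.2.2)).all
      (fun le => le.2.1 != 0 || (msTs subscribe end_ e.2.2).isEmpty)) = true ∧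
    ∀ i ∈ List.range ((msTs subscribe end_ e.2.2).length + 1),
      ((msTs subscribe end_ e.2.2).take i).countP (fun t => t != "subscrib")
        ≤ ((msTs subscribe end_ e.2.2).take i).countP (fun t => t == "subscrib")

instance (subscribe : List (String × Int × String)) (event : List (Int × Int × String)) (end_ : Int) : Decidable (Pre_micro_services subscribe event end_) := by unfold Pre_micro_services; infer_instance

def pvWitness_micro_services : (List (String × Int × String)) × (List (Int × Int × String)) × Int :=
  ([("subscrib", 1, "a"), ("unsubscrib", 5, "a")], [(0, 2, "a"), (0, 3, "b")], 9)

def Spec_micro_services (subscribe : List (String × Int × String)) (event : List (Int × Int × String)) (end_ : Int) (out : List (String × Int)) : Prop := out = micro_services_alt subscribe event end_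
instance (subscribe : List (String × Int × String)) (event : List (Int × Int × String)) (end_ : Int) (out : List (String × Int)) : Decidable (Spec_micro_services subscribe event end_ out) := by unfold Spec_micro_services; infer_instance

-- ===== CLAIM (what is proved, stated in full; the proofs are below) =====
def Claim_equal_micro_services : Prop := ∀ (subscribe : List (String × Int × String)) (event : List (Int × Int × String)) (end_ : Int), Dom_micro_services subscribe event end_ → Pre_micro_services subscribe event end_ → Spec_micro_services subscribe event end_ (micro_services subscribe event end_)

-- ===== LEMMAS AND PROOFS =====

-- proof-only abstraction of A's per-service behaviour: the stack step (state = (total, stack))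
def msStepK (start freq : Int) (st : Int × List Int) (q : String × Int) : Int × List Int :=
  if q.1 == "subscrib" then (st.1, st.2 ++ [q.2])
  else
    match PySem.List.pop? st.2 with
    | none => st
    | some pr => (st.1 + msContrib start freq pr.1 q.2, pr.2)

-- proof-only abstraction of A's cleanup at one service
def msFinal (start freq end_ : Int) (st : Int × List Int) : Int :=
  match PySem.List.pop? st.2 with
  | none => st.1
  | some pr => st.1 + msContrib start freq pr.1 end_

-- A's in-loop count update equals B's contrib helper
lemma msContrib_eq (start freq subRaw t : Int) :
    PySem.Int.floordiv (t - start) freq - PySem.Int.floordiv (max subRaw start - start) freq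
      + (if PySem.Int.mod (max subRaw start - start) freq = 0 ∧ PySem.Int.mod (t - start) freq = 0 then 1 else 0)
    = msContrib start freq subRaw t := by
  simp only [msContrib]
  split_ifs <;> ring

-- groups.getD s [] is the (typ, time) projection of the s-events of the ordered list
lemma groups_getD (ordered : List (String × Int × String)) (s : String) :
    (ordered.foldl (fun g q => g.modify q.2.2 [] (fun l => l ++ [(q.1, q.2.1)])) (PySem.Dict.empty : PySem.Dict String (List (String × Int)))).getD s []
    = (ordered.filter (fun x => x.2.2 == s)).map (fun q => (q.1, q.2.1)) := by
  have h := PySem.Dict.getD_foldl_modify_append (ordered.map (fun q => (q.2.2, (q.1, q.2.1)))) (PySem.Dict.empty : PySem.Dict String (List (String × Int))) s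
  rw [List.foldl_map] at h
  simpa [List.filter_map, Function.comp] using h

-- a fold of constant-value inserts never changes a getD at that same constant
lemma getD_foldl_insert_const {ν : Type} (ks : List String) (v : ν) (d : PySem.Dict String ν) (s : String) (h : d.getD s v = v) :
    (ks.foldl (fun d k => d.insert k v) d).getD s v = v := by
  induction ks generalizing d with
  | nil => simpa using h
  | cons k ks ih =>
    simp only [List.foldl_cons]
    exact ih _ (by rw [PySem.Dict.getD_insert]; split <;> simp [h])

-- steps at another service's key leave the s-components of the state unchanged
lemma stepA_getD_other (ef : PySem.Dict String (Int × Int))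
    (st : PySem.Dict String (List Int) × PySem.Dict String Int) (q : String × Int × String)
    (s : String) (hne : s ≠ q.2.2) :
    (msStepA ef st q).1.getD s [] = st.1.getD s [] ∧ (msStepA ef st q).2.getD s 0 = st.2.getD s 0 := by
  cases hq : ef.get? q.2.2 with
  | none => simp [msStepA, hq]
  | some sf =>
    by_cases hb : (q.1 == "subscrib") = true
    · simp only [msStepA, hq, hb, if_pos]
      refine ⟨PySem.Dict.getD_modify_of_ne _ _ _ hne, ?_⟩
      trivial
    · simp only [Bool.not_eq_true] at hb
      cases hp : PySem.List.pop? (st.1.getD q.2.2 []) with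
      | none => simp [msStepA, hq, hb, hp]
      | some pr =>
        simp only [msStepA, hq, hb, hp, Bool.false_eq_true, if_neg, not_false_iff]
        exact ⟨PySem.Dict.getD_insert_of_ne _ _ _ hne, PySem.Dict.getD_modify_of_ne _ _ _ hne⟩

-- per-key reading of A's main loop: the s-components of A's dict state evolve by the stack step
lemma stepA_perKey (ef : PySem.Dict String (Int × Int)) (s : String) (sf : Int × Int)
    (hs : ef.get? s = some sf) (L : List (String × Int × String))
    (st : PySem.Dict String (List Int) × PySem.Dict String Int) :
    ((L.foldl (msStepA ef) st).2.getD s 0, (L.foldl (msStepA ef) st).1.getD s [])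
    = ((L.filter (fun q => q.2.2 == s)).map (fun q => (q.1, q.2.1))).foldl (msStepK sf.1 sf.2) (st.2.getD s 0, st.1.getD s []) := by
  induction L generalizing st with
  | nil => rfl
  | cons q L ih =>
    rw [List.foldl_cons]
    by_cases hqs : q.2.2 = s
    · subst hqs
      rw [List.filter_cons, if_pos (by simp), List.map_cons, List.foldl_cons]
      by_cases hb : (q.1 == "subscrib") = true
      · simp only [msStepA, hs, hb, if_pos]
        rw [ih]
        simp only [msStepK, hb, if_pos]
        rw [PySem.Dict.getD_modify_self]
      · simp only [Bool.not_eq_true] at hb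
        cases hp : PySem.List.pop? (st.1.getD q.2.2 []) with
        | none =>
          simp only [msStepA, hs, hb, hp, Bool.false_eq_true, if_neg, not_false_iff]
          rw [ih]
          simp only [msStepK, hb, Bool.false_eq_true, if_neg, not_false_iff, hp]
        | some pr =>
          simp only [msStepA, hs, hb, hp, Bool.false_eq_true, if_neg, not_false_iff]
          rw [ih]
          simp only [msStepK, hb, Bool.false_eq_true, if_neg, not_false_iff, hp]
          rw [PySem.Dict.getD_modify_self, PySem.Dict.getD_insert_self, msContrib_eq]
    · rw [List.filter_cons, if_neg (by simp [hqs])]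
      rw [ih]
      obtain ⟨g1, g2⟩ := stepA_getD_other ef st q s (Ne.symm hqs)
      rw [g1, g2]

-- a cleanup step at another key leaves the s-components unchanged
lemma cleanA_getD_other (ef : PySem.Dict String (Int × Int)) (end_ : Int)
    (st : PySem.Dict String (List Int) × PySem.Dict String Int) (k s : String) (hne : s ≠ k) :
    (msCleanA ef end_ st k).1.getD s [] = st.1.getD s [] ∧ (msCleanA ef end_ st k).2.getD s 0 = st.2.getD s 0 := by
  by_cases hg : st.1.getD k [] ≠ []
  · cases hq : ef.get? k with
    | none => simp [msCleanA, hq]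
    | some sf =>
      cases hp : PySem.List.pop? (st.1.getD k []) with
      | none => simp [msCleanA, hq, hp]
      | some pr =>
        simp only [msCleanA, hq, hp, if_pos hg]
        exact ⟨PySem.Dict.getD_insert_of_ne _ _ _ hne, PySem.Dict.getD_modify_of_ne _ _ _ hne⟩
  · simp [msCleanA, if_neg hg]

lemma cleanA_foldl_other (ef : PySem.Dict String (Int × Int)) (end_ : Int) (s : String)
    (ks : List String) (st : PySem.Dict String (List Int) × PySem.Dict String Int) (hnot : s ∉ ks) :
    (ks.foldl (msCleanA ef end_) st).2.getD s 0 = st.2.getD s 0 := by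
  induction ks generalizing st with
  | nil => rfl
  | cons k ks ih =>
    rw [List.foldl_cons]
    rw [ih _ (fun h => hnot (List.mem_cons_of_mem _ h))]
    exact (cleanA_getD_other ef end_ st k s (fun h => hnot (h ▸ List.mem_cons_self))).2

-- per-key reading of A's cleanup loop over a Nodup key list
lemma cleanA_perKey (ef : PySem.Dict String (Int × Int)) (end_ : Int) (s : String) (sf : Int × Int)
    (hs : ef.get? s = some sf) (ks : List String) (hnd : ks.Nodup)
    (st : PySem.Dict String (List Int) × PySem.Dict String Int) :
    (ks.foldl (msCleanA ef end_) st).2.getD s 0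
    = if s ∈ ks then msFinal sf.1 sf.2 end_ (st.2.getD s 0, st.1.getD s []) else st.2.getD s 0 := by
  induction ks generalizing st with
  | nil => simp
  | cons k ks ih =>
    obtain ⟨hknot, hnd'⟩ := List.nodup_cons.mp hnd
    rw [List.foldl_cons]
    by_cases hks : k = s
    · subst hks
      rw [cleanA_foldl_other ef end_ k ks _ hknot, if_pos List.mem_cons_self]
      by_cases hg : st.1.getD k [] ≠ []
      · obtain ⟨ys, y, hl⟩ : ∃ ys y, st.1.getD k [] = ys ++ [y] := by
          rcases List.eq_nil_or_concat (st.1.getD k []) with h | ⟨ys, y, h⟩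
          · exact absurd h hg
          · exact ⟨ys, y, by simpa using h⟩
        have hp : PySem.List.pop? (st.1.getD k []) = some (y, ys) := by
          rw [hl]; exact PySem.List.pop?_last ys y
        simp only [msCleanA, hs, hp, if_pos hg]
        rw [PySem.Dict.getD_modify_self]
        simp only [msFinal, hp]
        rw [msContrib_eq]
      · simp only [msCleanA, if_neg hg]
        simp only [Ne, not_not] at hg
        simp [msFinal, hg, PySem.List.pop?]
    · have hne : s ≠ k := fun h => hks h.symm
      obtain ⟨g1, g2⟩ := cleanA_getD_other ef end_ st k s hne
      rw [ih hnd', g1, g2]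
      simp [List.mem_cons, hne]

-- keys are preserved by A's main loop and cleanup loop
lemma mem_keys_of_get?_some (ef : PySem.Dict String (Int × Int)) (k : String) (sf : Int × Int)
    (h : ef.get? k = some sf) : k ∈ ef.keys := by
  by_contra hn
  rw [← PySem.Dict.get?_eq_none_iff_not_mem_keys] at hn
  simp [h] at hn

lemma keys_stepA_single (ef : PySem.Dict String (Int × Int))
    (st : PySem.Dict String (List Int) × PySem.Dict String Int) (q : String × Int × String)
    (h1 : st.1.keys = ef.keys) (h2 : st.2.keys = ef.keys) :
    (msStepA ef st q).1.keys = ef.keys ∧ (msStepA ef st q).2.keys = ef.keys := by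
  unfold msStepA
  cases hq : ef.get? q.2.2 with
  | none => exact ⟨h1, h2⟩
  | some sf =>
    have hc1 : st.1.contains q.2.2 = true :=
      (PySem.Dict.contains_iff_mem_keys _ _).mpr (h1 ▸ mem_keys_of_get?_some ef _ sf hq)
    have hc2 : st.2.contains q.2.2 = true :=
      (PySem.Dict.contains_iff_mem_keys _ _).mpr (h2 ▸ mem_keys_of_get?_some ef _ sf hq)
    by_cases hb : q.1 == "subscrib"
    · simp only [hb, if_pos]
      exact ⟨by rw [PySem.Dict.keys_modify, PySem.Dict.keys_insert_of_contains _ _ hc1, h1], h2⟩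
    · simp only [hb, if_neg, Bool.false_eq_true, not_false_iff]
      cases hp : PySem.List.pop? (st.1.getD q.2.2 []) with
      | none => exact ⟨h1, h2⟩
      | some pr =>
        refine ⟨?_, ?_⟩
        · rw [PySem.Dict.keys_insert_of_contains _ _ hc1, h1]
        · rw [PySem.Dict.keys_modify, PySem.Dict.keys_insert_of_contains _ _ hc2, h2]

lemma keys_cleanA_single (ef : PySem.Dict String (Int × Int)) (end_ : Int)
    (st : PySem.Dict String (List Int) × PySem.Dict String Int) (k : String)
    (h1 : st.1.keys = ef.keys) (h2 : st.2.keys = ef.keys) :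
    (msCleanA ef end_ st k).1.keys = ef.keys ∧ (msCleanA ef end_ st k).2.keys = ef.keys := by
  by_cases hg : st.1.getD k [] ≠ []
  · have hc1 : st.1.contains k = true := by
      by_contra hn
      simp only [Bool.not_eq_true] at hn
      exact hg (PySem.Dict.getD_of_not_contains st.1 [] hn)
    have hmem : k ∈ ef.keys := h1 ▸ (PySem.Dict.contains_iff_mem_keys _ _).mp hc1
    have hc2 : st.2.contains k = true := (PySem.Dict.contains_iff_mem_keys _ _).mpr (h2 ▸ hmem)
    cases hq : ef.get? k with
    | none => simp only [msCleanA, hq, if_pos hg]; exact ⟨h1, h2⟩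
    | some sf =>
      cases hp : PySem.List.pop? (st.1.getD k []) with
      | none => simp only [msCleanA, hq, hp, if_pos hg]; exact ⟨h1, h2⟩
      | some pr =>
        simp only [msCleanA, hq, hp, if_pos hg]
        refine ⟨?_, ?_⟩
        · rw [PySem.Dict.keys_insert_of_contains _ _ hc1, h1]
        · rw [PySem.Dict.keys_modify, PySem.Dict.keys_insert_of_contains _ _ hc2, h2]
  · simp only [msCleanA, if_neg hg]
    exact ⟨h1, h2⟩

lemma keys_foldl_stepA (ef : PySem.Dict String (Int × Int)) (L : List (String × Int × String))
    (st : PySem.Dict String (List Int) × PySem.Dict String Int)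
    (h1 : st.1.keys = ef.keys) (h2 : st.2.keys = ef.keys) :
    (L.foldl (msStepA ef) st).1.keys = ef.keys ∧ (L.foldl (msStepA ef) st).2.keys = ef.keys := by
  induction L generalizing st with
  | nil => exact ⟨h1, h2⟩
  | cons q L ih =>
    obtain ⟨g1, g2⟩ := keys_stepA_single ef st q h1 h2
    exact ih _ g1 g2

lemma keys_foldl_cleanA (ef : PySem.Dict String (Int × Int)) (end_ : Int) (ks : List String)
    (st : PySem.Dict String (List Int) × PySem.Dict String Int)
    (h1 : st.1.keys = ef.keys) (h2 : st.2.keys = ef.keys) :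
    (ks.foldl (msCleanA ef end_) st).1.keys = ef.keys ∧ (ks.foldl (msCleanA ef end_) st).2.keys = ef.keys := by
  induction ks generalizing st with
  | nil => exact ⟨h1, h2⟩
  | cons k ks ih =>
    obtain ⟨g1, g2⟩ := keys_cleanA_single ef end_ st k h1 h2
    exact ih _ g1 g2

lemma nodup_keys_msEventFact (event : List (Int × Int × String)) : (msEventFact event).keys.Nodup :=
  PySem.Dict.nodup_keys_foldl_insert_key event (fun q => q.2.2) (fun _ q => (q.1, q.2.1)) _ PySem.Dict.nodup_keys_empty

lemma keys_init (kl : List String) (hnd : kl.Nodup) {ν : Type} (v : ν) :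
    (kl.foldl (fun d k => d.insert k v) (PySem.Dict.empty : PySem.Dict String ν)).keys = kl := by
  have h := PySem.Dict.items_foldl_insert_fresh kl (fun k => k) (fun _ => v) (PySem.Dict.empty : PySem.Dict String ν)
    (by simp) (by simpa using hnd)
  simp only [PySem.Dict.keys, h]
  simp [PySem.Dict.empty, Function.comp_def]

-- ===== reduction (B) = stack sweep (A per key) =====

-- the stack step is additive in the running total
lemma stepK_shift (start freq : Int) (L : List (String × Int)) (a x : Int) (stk : List Int) :
    L.foldl (msStepK start freq) (a + x, stk)
    = (a + (L.foldl (msStepK start freq) (x, stk)).1, (L.foldl (msStepK start freq) (x, stk)).2) := by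
  induction L generalizing x stk with
  | nil => rfl
  | cons q L ih =>
    rw [List.foldl_cons, List.foldl_cons]
    by_cases hb : (q.1 == "subscrib") = true
    · simp only [msStepK, hb, if_pos]
      exact ih x (stk ++ [q.2])
    · simp only [msStepK, hb, Bool.false_eq_true, if_neg, not_false_iff]
      cases hp : PySem.List.pop? stk with
      | none => exact ih x stk
      | some pr =>
        simp only []
        rw [add_assoc]
        exact ih _ pr.2

-- cancelling the found pair does not change the stack sweep (up to the pair's contribution)
lemma stepK_shift' (start freq : Int) (L : List (String × Int)) (c : Int) (stk : List Int) :
    L.foldl (msStepK start freq) (c, stk)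
    = (c + (L.foldl (msStepK start freq) (0, stk)).1, (L.foldl (msStepK start freq) (0, stk)).2) := by
  have := stepK_shift start freq L c 0 stk
  rwa [add_zero] at this

lemma findPair_fold (start freq : Int) : ∀ (seq : List (String × Int)) (s t : Int) (r : List (String × Int)),
    msFindPair seq = some (s, t, r) → ∀ stk : List Int,
    seq.foldl (msStepK start freq) (0, stk)
    = ((r.foldl (msStepK start freq) (0, stk)).1 + msContrib start freq s t,
       (r.foldl (msStepK start freq) (0, stk)).2) := by
  intro seq
  induction seq with
  | nil => intro s t r h; simp [msFindPair] at h
  | cons a tl ih =>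
    intro s t r h stk
    cases tl with
    | nil => simp [msFindPair] at h
    | cons b rest =>
      by_cases hc : (a.1 == "subscrib" && !(b.1 == "subscrib")) = true
      · simp [msFindPair, hc] at h
        obtain ⟨hs, ht, hr⟩ := h
        obtain ⟨ha, hbn⟩ := Bool.and_eq_true_iff.mp hc
        have hbn' : (b.1 == "subscrib") = false := by
          cases hbb : (b.1 == "subscrib") <;> simp [hbb] at hbn ⊢
        rw [List.foldl_cons, List.foldl_cons]
        simp only [msStepK, ha, if_pos, hbn', Bool.false_eq_true, if_neg, not_false_iff,
          PySem.List.pop?_last stk a.2]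
        rw [← hr, ← hs, ← ht, zero_add, stepK_shift' start freq rest (msContrib start freq a.2 b.2) stk]
        rw [add_comm]
      · simp only [msFindPair, hc, Bool.false_eq_true, if_neg, not_false_iff] at h
        cases hm : msFindPair (b :: rest) with
        | none => rw [hm] at h; simp at h
        | some p =>
          obtain ⟨s', t', r'⟩ := p
          rw [hm] at h
          simp at h
          obtain ⟨hs, ht, hr⟩ := h
          rw [← hr, ← hs, ← ht]
          have key : ∀ st : Int × List Int,
              (b :: rest).foldl (msStepK start freq) st
              = ((r'.foldl (msStepK start freq) st).1 + msContrib start freq s' t',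
                 (r'.foldl (msStepK start freq) st).2) := by
            intro st
            obtain ⟨c, stk0⟩ := st
            rw [stepK_shift' start freq (b :: rest) c stk0, stepK_shift' start freq r' c stk0,
                ih s' t' r' hm stk0]
            simp only []
            rw [add_assoc]
          calc (a :: b :: rest).foldl (msStepK start freq) (0, stk)
              = (b :: rest).foldl (msStepK start freq) (msStepK start freq (0, stk) a) := rfl
            _ = ((r'.foldl (msStepK start freq) (msStepK start freq (0, stk) a)).1 + msContrib start freq s' t',
                 (r'.foldl (msStepK start freq) (msStepK start freq (0, stk) a)).2) := key _
            _ = (((a :: r').foldl (msStepK start freq) (0, stk)).1 + msContrib start freq s' t',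
                 ((a :: r').foldl (msStepK start freq) (0, stk)).2) := rfl

-- an irreducible sequence is some non-subscribes followed by some subscribes
lemma findPair_none_shape : ∀ (seq : List (String × Int)), msFindPair seq = none →
    ∃ u v : List (String × Int), seq = u ++ v ∧
      (∀ q ∈ u, (q.1 == "subscrib") = false) ∧ (∀ q ∈ v, (q.1 == "subscrib") = true) := by
  intro seq
  induction seq with
  | nil => intro _; exact ⟨[], [], by simp, by simp, by simp⟩
  | cons a tl ih =>
    intro h
    cases tl with
    | nil =>
      by_cases hb : (a.1 == "subscrib") = true
      · refine ⟨[], [a], by simp, by simp, ?_⟩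
        intro q hq
        simp only [List.mem_singleton] at hq
        subst hq; exact hb
      · refine ⟨[a], [], by simp, ?_, by simp⟩
        intro q hq
        simp only [List.mem_singleton] at hq
        subst hq; simpa using hb
    | cons b rest =>
      by_cases hc : (a.1 == "subscrib" && !(b.1 == "subscrib")) = true
      · simp [msFindPair, hc] at h
      · simp only [msFindPair, hc, Bool.false_eq_true, if_neg, not_false_iff] at h
        cases hm : msFindPair (b :: rest) with
        | some p => obtain ⟨s', t', r'⟩ := p; rw [hm] at h; simp at h
        | none =>
          obtain ⟨u, v, he, hu, hv⟩ := ih hm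
          by_cases hb : (a.1 == "subscrib") = true
          · -- then b is a subscribe too, so u must be empty
            have hbb : (b.1 == "subscrib") = true := by
              cases hbv : (b.1 == "subscrib")
              · exfalso; apply hc; simp [hb, hbv]
              · rfl
            cases u with
            | nil =>
              refine ⟨[], a :: v, by simpa using he, by simp, ?_⟩
              intro q hq
              rcases List.mem_cons.mp hq with h1 | h1
              · subst h1; exact hb
              · exact hv q h1
            | cons x xs =>
              have hx : b = x := by simpa using congrArg (fun l => l.head?) he
              have hxf := hu x (by simp)
              rw [← hx, hbb] at hxf
              exact absurd hxf (by simp)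
          · refine ⟨a :: u, v, by simp [he], ?_, hv⟩
            intro q hq
            rcases List.mem_cons.mp hq with h1 | h1
            · subst h1; simpa using hb
            · exact hu q h1

-- the stack sweep of an irreducible sequence equals B's tail handling
lemma irreducible_fold (start freq end_ : Int) (seq : List (String × Int))
    (h : msFindPair seq = none) :
    msFinal start freq end_ (seq.foldl (msStepK start freq) (0, []))
    = msTail start freq end_ seq := by
  obtain ⟨u, v, he, hu, hv⟩ := findPair_none_shape seq h
  subst he
  have hufold : ∀ u' : List (String × Int), (∀ q ∈ u', (q.1 == "subscrib") = false) →
      u'.foldl (msStepK start freq) ((0 : Int), ([] : List Int)) = (0, []) := by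
    intro u'
    induction u' with
    | nil => intro _; rfl
    | cons q u' ih =>
      intro hq
      rw [List.foldl_cons]
      have hqf := hq q (by simp)
      simp only [msStepK, hqf, Bool.false_eq_true, if_neg, not_false_iff]
      simp only [PySem.List.pop?]
      exact ih (fun x hx => hq x (by simp [hx]))
  have hvfold : ∀ (v' : List (String × Int)) (stk : List Int), (∀ q ∈ v', (q.1 == "subscrib") = true) →
      v'.foldl (msStepK start freq) ((0 : Int), stk) = (0, stk ++ v'.map (·.2)) := by
    intro v'
    induction v' with
    | nil => intro stk _; simp
    | cons q v' ih =>
      intro stk hq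
      rw [List.foldl_cons]
      simp only [msStepK, hq q (by simp), if_pos]
      rw [ih (stk ++ [q.2]) (fun x hx => hq x (by simp [hx]))]
      simp
  rw [List.foldl_append, hufold u hu, hvfold v [] hv]
  cases hv' : v.eq_nil_or_concat' with
  | inl hnil =>
    subst hnil
    have : u.getLast? = none ∨ ∃ q, u.getLast? = some q ∧ (q.1 == "subscrib") = false := by
      cases hg : u.getLast? with
      | none => exact Or.inl rfl
      | some q => exact Or.inr ⟨q, rfl, hu q (List.mem_of_getLast? hg)⟩
    rcases this with hg | ⟨q, hg, hqf⟩
    · simp [msFinal, msTail, hg, PySem.List.pop?]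
    · simp [msFinal, msTail, hg, hqf, PySem.List.pop?]
  | inr hcon =>
    obtain ⟨v0, q, hveq⟩ := hcon
    subst hveq
    have hlast : (u ++ (v0 ++ [q])).getLast? = some q := by
      rw [List.getLast?_append]
      simp
    have hqs : (q.1 == "subscrib") = true := hv q (by simp)
    simp only [msFinal, msTail, hlast, hqs, if_pos, List.map_append, List.nil_append, List.map_cons, List.map_nil]
    rw [PySem.List.pop?_last (v0.map (fun x => x.2)) q.2]
    simp

-- B's cancellation loop plus tail equals A's stack sweep plus cleanup, per service
lemma reduce_eq_fold (start freq end_ : Int) (seq : List (String × Int)) :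
    (msReduce start freq seq).1 + msTail start freq end_ (msReduce start freq seq).2
    = msFinal start freq end_ (seq.foldl (msStepK start freq) (0, [])) := by
  induction hn : seq.length using Nat.strong_induction_on generalizing seq with
  | _ n ih =>
    cases hm : msFindPair seq with
    | none =>
      rw [msReduce, hm]
      simp only []
      rw [zero_add, irreducible_fold start freq end_ seq hm]
    | some p =>
      obtain ⟨s, t, r⟩ := p
      rw [msReduce, hm]
      simp only []
      have hlen := msFindPair_length seq s t r hm
      have hrec := ih r.length (by omega) r rfl
      rw [findPair_fold start freq seq s t r hm []]
      have hfin : ∀ (x c : Int) (stk : List Int), msFinal start freq end_ (x + c, stk) = c + msFinal start freq end_ (x, stk) := by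
        intro x c stk
        simp only [msFinal]
        cases PySem.List.pop? stk <;> simp <;> ring
      rw [hfin, ← hrec]
      ring

-- the two ports agree unconditionally in Lean (the Python-raising inputs are excluded by Pre_)
lemma micro_services_eq_alt (subscribe : List (String × Int × String)) (event : List (Int × Int × String)) (end_ : Int) :
    micro_services subscribe event end_ = micro_services_alt subscribe event end_ := by
  unfold micro_services micro_services_alt msEventFact
  have hnd : (msEventFact event).keys.Nodup := nodup_keys_msEventFact event
  unfold msEventFact at hnd
  set ef := event.foldl (fun d q => d.insert q.2.2 (q.1, q.2.1)) (PySem.Dict.empty : PySem.Dict String (Int × Int)) with hef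
  set ordered := PySem.List.sorted (subscribe.filter (fun s => decide (s.2.1 ≤ end_))) (fun x => x.2.1) false with hord
  set record0 : PySem.Dict String (List Int) := ef.keys.foldl (fun d k => d.insert k []) PySem.Dict.empty with hr0
  set count0 : PySem.Dict String Int := ef.keys.foldl (fun d k => d.insert k 0) PySem.Dict.empty with hc0
  set st := ordered.foldl (msStepA ef) (record0, count0) with hst
  set st2 := st.1.keys.foldl (msCleanA ef end_) st with hst2
  set groups := ordered.foldl (fun g q => g.modify q.2.2 [] (fun l => l ++ [(q.1, q.2.1)])) (PySem.Dict.empty : PySem.Dict String (List (String × Int))) with hgr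
  have r0keys : record0.keys = ef.keys := keys_init ef.keys hnd []
  have c0keys : count0.keys = ef.keys := keys_init ef.keys hnd 0
  obtain ⟨stk1, stk2⟩ := keys_foldl_stepA ef ordered (record0, count0) r0keys c0keys
  rw [← hst] at stk1 stk2
  obtain ⟨-, st2k2⟩ := keys_foldl_cleanA ef end_ st.1.keys st stk1 stk2
  rw [← hst2] at st2k2
  have hL : st2.2.items = ef.keys.map (fun k => (k, st2.2.getD k 0)) := by
    rw [PySem.Dict.items_eq_map_keys st2.2 (st2k2 ▸ hnd) 0, st2k2]
  have hR : (ef.items.foldl (fun r p =>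
        let red := msReduce p.2.1 p.2.2 (groups.getD p.1 [])
        r.insert p.1 (red.1 + msTail p.2.1 p.2.2 end_ red.2)) (PySem.Dict.empty : PySem.Dict String Int)).items
      = ef.items.map (fun p => (p.1,
          (msReduce p.2.1 p.2.2 (groups.getD p.1 [])).1
            + msTail p.2.1 p.2.2 end_ (msReduce p.2.1 p.2.2 (groups.getD p.1 [])).2)) := by
    have h := PySem.Dict.items_foldl_insert_fresh ef.items (fun p => p.1)
      (fun p => (msReduce p.2.1 p.2.2 (groups.getD p.1 [])).1
        + msTail p.2.1 p.2.2 end_ (msReduce p.2.1 p.2.2 (groups.getD p.1 [])).2)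
      (PySem.Dict.empty : PySem.Dict String Int) (by simp) (by simpa [PySem.Dict.keys] using hnd)
    simpa [PySem.Dict.empty] using h
  simp only []
  rw [hL, hR, PySem.Dict.items_eq_map_keys ef hnd (0, 0), List.map_map]
  refine List.map_congr_left ?_
  intro k hk
  simp only [Function.comp]
  have hsk : ∃ sf, ef.get? k = some sf := by
    cases h : ef.get? k with
    | none => exact absurd hk ((PySem.Dict.get?_eq_none_iff_not_mem_keys ef k).mp h)
    | some sf => exact ⟨sf, rfl⟩
  obtain ⟨sf, hsk⟩ := hsk
  have hgetD : ef.getD k (0, 0) = sf := PySem.Dict.getD_of_get?_eq_some ef (0, 0) hsk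
  have hclean := cleanA_perKey ef end_ k sf hsk st.1.keys (stk1 ▸ hnd) st
  rw [if_pos (stk1 ▸ hk)] at hclean
  rw [← hst2] at hclean
  have hmain := stepA_perKey ef k sf hsk ordered (record0, count0)
  rw [← hst] at hmain
  have h01 : count0.getD k 0 = 0 :=
    getD_foldl_insert_const ef.keys 0 PySem.Dict.empty k (by simp)
  have h02 : record0.getD k [] = [] :=
    getD_foldl_insert_const ef.keys [] PySem.Dict.empty k (by simp)
  rw [h01, h02] at hmain
  have hgrp := groups_getD ordered k
  rw [← hgr] at hgrp
  rw [hclean, hgetD, hgrp, hmain,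
     ← reduce_eq_fold sf.1 sf.2 end_ ((ordered.filter (fun q => q.2.2 == k)).map fun q => (q.1, q.2.1))]

-- ===== VERDICT (by name: the statement is the Claim_ definition above) =====
theorem micro_services_spec : Claim_equal_micro_services := by
  intro subscribe event end_ _ _
  unfold Spec_micro_services
  exact micro_services_eq_alt subscribe event end_
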